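-- pv_equiv track=rewrite | github.com/RajSuriyan/Algos | Check Sum in the array.py | dsa
-- ===== SOURCE A (Python) =====
-- def dsa(a,b):
--     count=0
--     for i in range(len(a)):
--         count+=1
--         if(a[i]>b[i]):
--             a[i]=a[i]-b[i]
--         if(len(set(a))==1):
--             break
--     return count
-- ===== SOURCE B (Python) =====
-- def dsa(a, b):
--     # Maintain a frequency dict of a's current values so the "all elements
--     # equal" test is len(freq) == 1 in O(1) instead of rebuilding set(a).
--     # Like A, mutates a in place.
--     freq = {}
--     for x in a:
--         freq[x] = freq.get(x, 0) + 1
--     for i in range(len(a)):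
--         x = a[i]
--         if x > b[i]:
--             nx = x - b[i]
--             freq[x] -= 1
--             if freq[x] == 0:
--                 del freq[x]
--             freq[nx] = freq.get(nx, 0) + 1
--             a[i] = nx
--         if len(freq) == 1:
--             return i + 1
--     return len(a)
-- ===== Notes on version B (the rewrite author's own statement) =====
-- stated objective: faster
-- what changed: B maintains an incrementally-updated frequency dict of a's current values (built once, adjusted per element change) and tests all-equal via len(freq)==1 in O(1), instead of A rebuilding set(a) from scratch every iteration.
-- outside the precondition, e.g. on dsa([1, 1], [3]): A returns 1, B returns 1
import Mathlib
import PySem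

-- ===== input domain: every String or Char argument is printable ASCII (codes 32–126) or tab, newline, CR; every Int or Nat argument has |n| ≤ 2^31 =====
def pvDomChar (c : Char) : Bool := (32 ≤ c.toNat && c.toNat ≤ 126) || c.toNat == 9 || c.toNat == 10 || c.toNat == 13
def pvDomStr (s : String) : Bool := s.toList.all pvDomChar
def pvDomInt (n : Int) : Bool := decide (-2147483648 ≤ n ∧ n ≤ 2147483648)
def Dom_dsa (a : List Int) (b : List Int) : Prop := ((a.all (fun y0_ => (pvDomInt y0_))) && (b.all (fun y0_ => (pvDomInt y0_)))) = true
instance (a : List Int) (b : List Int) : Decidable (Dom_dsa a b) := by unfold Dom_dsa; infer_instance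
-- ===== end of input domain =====

-- B replaces A's per-iteration rebuild of set(a) by a frequency dict updated per
-- element change, testing all-equal via the dict's size (objective: faster).
-- Both Pythons mutate the list a in place identically; the equivalence proved
-- here is about the return value.

-- ===== PORT A =====
-- loop over i in range(len(a)) with break, fuel = len(a) computed once
def dsaGoA (b : List Int) : Nat → List Int → Nat → Int → Int
  | 0, _, _, count => count
  | n+1, a, i, count =>
    let count' := count + 1
    let ai := PySem.List.pyGetD a (i : Int) 0
    let bi := PySem.List.pyGetD b (i : Int) 0
    let a' := if bi < ai then PySem.List.pySetD a (i : Int) (ai - bi) else a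
    if PySem.Set.len (PySem.Set.ofList a') = 1 then count'
    else dsaGoA b n a' (i+1) count'

def dsa (a : List Int) (b : List Int) : Int := dsaGoA b a.length a 0 0

-- ===== PORT B =====
def dsaGoB (b : List Int) : Nat → List Int → PySem.Dict Int Int → Nat → Int
  | 0, a, _, _ => PySem.List.len a
  | n+1, a, freq, i =>
    let x := PySem.List.pyGetD a (i : Int) 0
    let bi := PySem.List.pyGetD b (i : Int) 0
    let st :=
      if bi < x then
        let nx := x - bi
        let c := freq.getD x 0 - 1
        let f1 := if c = 0 then freq.erase x else freq.insert x c
        (PySem.List.pySetD a (i : Int) nx, f1.insert nx (f1.getD nx 0 + 1))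
      else (a, freq)
    if st.2.size = 1 then (i : Int) + 1
    else dsaGoB b n st.1 st.2 (i+1)

def dsa_alt (a : List Int) (b : List Int) : Int :=
  let freq := a.foldl (fun d x => d.insert x (d.getD x 0 + 1)) PySem.Dict.empty
  dsaGoB b a.length a freq 0

-- ===== PRECONDITION & SPEC =====
-- Pre_ excludes inputs with len(b) < len(a): there A raises IndexError unless an
-- early all-equal break occurs first; on the few such inputs where A still
-- returns, B returns the same value (see the cite), but they are outside the claim.
def Pre_dsa (a : List Int) (b : List Int) : Prop := a.length ≤ b.length
instance (a : List Int) (b : List Int) : Decidable (Pre_dsa a b) := by unfold Pre_dsa; infer_instance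
def pvWitness_dsa : List Int × List Int := ([5, 2, 3], [2, 1, 1])

def Spec_dsa (a : List Int) (b : List Int) (out : Int) : Prop := out = dsa_alt a b
instance (a : List Int) (b : List Int) (out : Int) : Decidable (Spec_dsa a b out) := by unfold Spec_dsa; infer_instance

-- ===== CLAIM (what is proved, stated in full; the proofs are below) =====
def Claim_equal_dsa : Prop := ∀ (a : List Int) (b : List Int), Dom_dsa a b → Pre_dsa a b → Spec_dsa a b (dsa a b)

-- ===== LEMMAS AND PROOFS =====

-- invariant tying B's frequency dict to the current list: unique keys, value =
-- multiplicity in a, and key present iff the element occurs in a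
def InvD (a : List Int) (f : PySem.Dict Int Int) : Prop :=
  f.keys.Nodup ∧ (∀ k, f.getD k 0 = (a.count k : Int)) ∧ (∀ k, f.contains k = true ↔ k ∈ a)

lemma get?_erase_self' {κ ν : Type} [BEq κ] (d : PySem.Dict κ ν) (k : κ) :
    (d.erase k).get? k = none := by
  suffices h : List.find? (fun p => p.1 == k) (d.items.filter (fun p => !p.1 == k)) = none by
    simp [PySem.Dict.erase, PySem.Dict.get?, h]
  rw [List.find?_eq_none]
  intro p hp
  simp only [List.mem_filter, Bool.not_eq_eq_eq_not, Bool.not_true] at hp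
  simp [hp.2]

lemma find?_filter_ne' {κ ν : Type} [BEq κ] [LawfulBEq κ] (t : List (κ × ν)) (k k' : κ)
    (h : k' ≠ k) :
    List.find? (fun p => p.1 == k') (t.filter (fun p => !p.1 == k))
      = List.find? (fun p => p.1 == k') t := by
  induction t with
  | nil => rfl
  | cons p t ih =>
    rw [List.filter_cons]
    by_cases hpk : p.1 = k
    · rw [if_neg (by simp [hpk]), List.find?_cons_of_neg (by simp [hpk, Ne.symm h]), ih]
    · rw [if_pos (by simp [hpk])]
      by_cases hpk' : p.1 = k'
      · rw [List.find?_cons_of_pos (by simp [hpk']), List.find?_cons_of_pos (by simp [hpk'])]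
      · rw [List.find?_cons_of_neg (by simp [hpk']), List.find?_cons_of_neg (by simp [hpk']), ih]

lemma get?_erase_of_ne' {κ ν : Type} [BEq κ] [LawfulBEq κ] (d : PySem.Dict κ ν) (k k' : κ)
    (h : k' ≠ k) : (d.erase k).get? k' = d.get? k' := by
  simp only [PySem.Dict.erase, PySem.Dict.get?]
  rw [find?_filter_ne' d.items k k' h]

lemma keys_erase_sublist' {κ ν : Type} [BEq κ] (d : PySem.Dict κ ν) (k : κ) :
    ((d.erase k).keys).Sublist d.keys := by
  simp only [PySem.Dict.erase, PySem.Dict.keys]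
  exact List.Sublist.map _ List.filter_sublist

lemma contains_erase' {κ ν : Type} [BEq κ] [LawfulBEq κ] (d : PySem.Dict κ ν) (k k' : κ) :
    (d.erase k).contains k' = true ↔ (k' ≠ k ∧ d.contains k' = true) := by
  by_cases h : k' = k
  · subst h
    simp [PySem.Dict.contains_eq_isSome_get?, get?_erase_self']
  · simp [PySem.Dict.contains_eq_isSome_get?, get?_erase_of_ne' d k k' h, h]

lemma getD_erase_self' {κ ν : Type} [BEq κ] (d : PySem.Dict κ ν) (k : κ) (d0 : ν) :
    (d.erase k).getD k d0 = d0 := by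
  simp [PySem.Dict.getD_eq_get?_getD, get?_erase_self']

lemma getD_erase_of_ne' {κ ν : Type} [BEq κ] [LawfulBEq κ] (d : PySem.Dict κ ν) (k k' : κ)
    (h : k' ≠ k) (d0 : ν) : (d.erase k).getD k' d0 = d.getD k' d0 := by
  simp [PySem.Dict.getD_eq_get?_getD, get?_erase_of_ne' d k k' h]

-- under the invariant, the dict's size is the number of distinct elements of a
lemma size_eq_distinct (a : List Int) (f : PySem.Dict Int Int) (h : InvD a f) :
    f.size = (PySem.Set.ofList a).length := by
  obtain ⟨hnd, -, hc⟩ := h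
  have hperm : f.keys.Perm (PySem.Set.ofList a) := by
    rw [List.perm_ext_iff_of_nodup hnd (PySem.Set.nodup_ofList a)]
    intro k
    rw [PySem.Set.mem_ofList, ← PySem.Dict.contains_iff_mem_keys]
    exact hc k
  have hs : f.size = f.keys.length := by simp [PySem.Dict.size, PySem.Dict.keys]
  rw [hs, hperm.length_eq]

lemma invD_counter (a : List Int) : InvD a (PySem.Dict.counter a) := by
  refine ⟨PySem.Dict.nodup_keys_counter a, fun k => PySem.Dict.getD_counter a k, fun k => ?_⟩
  rw [PySem.Dict.contains_counter]
  simp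

-- one element change a[i] := nx preserves the invariant under B's dict update
lemma invD_update (a : List Int) (f : PySem.Dict Int Int) (i : Nat) (hi : i < a.length)
    (nx : Int) (h : InvD a f) :
    InvD (a.set i nx)
      ((if f.getD a[i] 0 - 1 = 0 then f.erase a[i] else f.insert a[i] (f.getD a[i] 0 - 1)).insert nx
        ((if f.getD a[i] 0 - 1 = 0 then f.erase a[i] else f.insert a[i] (f.getD a[i] 0 - 1)).getD nx 0 + 1)) := by
  obtain ⟨hnd, hgetD, hcont⟩ := h
  set x := a[i] with hx
  have hxmem : x ∈ a := List.getElem_mem hi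
  have hxcount : 0 < a.count x := List.count_pos_iff.mpr hxmem
  have hcx : f.getD x 0 = (a.count x : Int) := hgetD x
  set c : Int := f.getD x 0 - 1 with hc
  set f1 := if c = 0 then f.erase x else f.insert x c with hf1
  -- f1 facts
  have hf1nd : f1.keys.Nodup := by
    rw [hf1]; split
    · exact (keys_erase_sublist' f x).nodup hnd
    · exact PySem.Dict.nodup_keys_insert f x c hnd
  have hf1getD_x : f1.getD x 0 = c := by
    rw [hf1]; split
    · rename_i h0; rw [getD_erase_self', h0]
    · exact PySem.Dict.getD_insert_self f x c 0
  have hf1getD_ne : ∀ k, k ≠ x → f1.getD k 0 = f.getD k 0 := by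
    intro k hk
    rw [hf1]; split
    · exact getD_erase_of_ne' f x k hk 0
    · exact PySem.Dict.getD_insert_of_ne f c 0 hk
  have hf1cont_x : f1.contains x = true ↔ c ≠ 0 := by
    rw [hf1]
    constructor
    · intro hcn
      split at hcn
      · exact absurd ((contains_erase' f x x).mp hcn).1 (by simp)
      · assumption
    · intro hcn
      rw [if_neg hcn]
      exact PySem.Dict.contains_insert_self f x c
  have hf1cont_ne : ∀ k, k ≠ x → (f1.contains k = true ↔ f.contains k = true) := by
    intro k hk
    rw [hf1]; split
    · rw [contains_erase' f x k]
      exact ⟨fun h' => h'.2, fun h' => ⟨hk, h'⟩⟩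
    · rw [PySem.Dict.contains_insert]
      simp [hk, hcont]
  -- count facts for the updated list
  have hcnt : ∀ k, (a.set i nx).count k
      = a.count k - (if x = k then 1 else 0) + (if nx = k then 1 else 0) := by
    intro k
    rw [List.count_set hi]
    simp [← hx]
  refine ⟨PySem.Dict.nodup_keys_insert f1 nx _ hf1nd, fun k => ?_, fun k => ?_⟩
  · -- getD clause
    by_cases hknx : k = nx
    · rw [hknx, PySem.Dict.getD_insert_self f1 nx _ 0]
      by_cases hxnx : x = nx
      · have hcnt' : List.count nx (a.set i nx) = List.count nx a - 1 + 1 := by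
          rw [hcnt nx, if_pos (show x = nx from hxnx), if_pos (show nx = nx from rfl)]
        rw [← hxnx] at hcnt' ⊢
        rw [hf1getD_x, hc, hcx, hcnt']
        omega
      · have hcnt' : List.count nx (a.set i nx) = List.count nx a - 0 + 1 := by
          rw [hcnt nx, if_neg (show ¬ x = nx from hxnx), if_pos (show nx = nx from rfl)]
        rw [hf1getD_ne nx (fun h' => hxnx h'.symm), hgetD nx, hcnt']
        omega
    · rw [PySem.Dict.getD_insert_of_ne f1 _ 0 hknx]
      by_cases hkx : k = x
      · have hgd : f1.getD k 0 = c := by rw [hkx]; exact hf1getD_x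
        have hcnt' : List.count k (a.set i nx) = List.count k a - 1 + 0 := by
          rw [hcnt k, if_pos (show x = k from hkx.symm), if_neg (show ¬ nx = k from fun h' => hknx h'.symm)]
        have hck : List.count k a = List.count x a := by rw [hkx]
        rw [hgd, hc, hcx]
        omega
      · have hcnt' : List.count k (a.set i nx) = List.count k a - 0 + 0 := by
          rw [hcnt k, if_neg (show ¬ x = k from fun h' => hkx h'.symm), if_neg (show ¬ nx = k from fun h' => hknx h'.symm)]
        rw [hf1getD_ne k hkx, hgetD k]
        omega
  · -- contains clause
    rw [PySem.Dict.contains_insert f1 nx k _, ← List.count_pos_iff]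
    by_cases hknx : k = nx
    · have h1 : (k == nx) = true := by simp [hknx]
      simp only [h1, Bool.true_or]
      have hle : (if x = k then 1 else 0) ≤ List.count k a := by
        split
        · rename_i h'; exact h' ▸ hxcount
        · omega
      have hcnt' := hcnt k
      rw [if_pos (show nx = k from hknx.symm)] at hcnt'
      constructor
      · intro _; omega
      · intro _; trivial
    · have h1 : (k == nx) = false := by simp [hknx]
      simp only [h1, Bool.false_or]
      have hcnt' : List.count k (a.set i nx) = List.count k a - (if x = k then 1 else 0) + 0 := by
        rw [hcnt k, if_neg (show ¬ nx = k from fun h' => hknx h'.symm)]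
      by_cases hkx : k = x
      · have hgc : f1.contains k = true ↔ c ≠ 0 := by rw [hkx]; exact hf1cont_x
        rw [if_pos (show x = k from hkx.symm)] at hcnt'
        have hck : List.count k a = List.count x a := by rw [hkx]
        rw [hgc, hc, hcx]
        constructor
        · intro h'; omega
        · intro h'; omega
      · rw [if_neg (show ¬ x = k from fun h' => hkx h'.symm)] at hcnt'
        rw [hf1cont_ne k hkx, hcont k, ← List.count_pos_iff]
        omega

lemma pySetD_eq_set (xs : List Int) (i : Nat) (v : Int) (h : i < xs.length) :
    PySem.List.pySetD xs (i : Int) v = xs.set i v := by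
  simp [PySem.List.pySetD, PySem.List.pySet?, PySem.List.pyIdx?, h]

-- main loop correspondence: A's scan with count = i equals B's scan under InvD
lemma go_eq (b : List Int) : ∀ (n : Nat) (a : List Int) (f : PySem.Dict Int Int) (i : Nat),
    i + n = a.length → InvD a f → dsaGoA b n a i (i : Int) = dsaGoB b n a f i := by
  intro n
  induction n with
  | zero =>
    intro a f i hlen _
    simp only [dsaGoA, dsaGoB, PySem.List.len_eq]
    omega
  | succ n ih =>
    intro a f i hlen hInv
    have hi : i < a.length := by omega
    have hxa : PySem.List.pyGetD a (i : Int) 0 = a[i] := PySem.List.pyGetD_ofNat a i 0 hi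
    simp only [dsaGoA, dsaGoB, hxa]
    set x := a[i] with hx
    set bi := PySem.List.pyGetD b (i : Int) 0 with hbi
    by_cases hgt : bi < x
    · -- element changes: a[i] := x - bi
      rw [if_pos hgt, if_pos hgt]
      rw [pySetD_eq_set a i (x - bi) hi]
      set nx := x - bi with hnx
      set f2 := ((if f.getD x 0 - 1 = 0 then f.erase x else f.insert x (f.getD x 0 - 1)).insert nx
        ((if f.getD x 0 - 1 = 0 then f.erase x else f.insert x (f.getD x 0 - 1)).getD nx 0 + 1)) with hf2
      have hInv' : InvD (a.set i nx) f2 := invD_update a f i hi nx hInv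
      have hsz : f2.size = (PySem.Set.ofList (a.set i nx)).length := size_eq_distinct _ _ hInv'
      have hcond : (PySem.Set.len (PySem.Set.ofList (a.set i nx)) = 1) ↔ (f2.size = 1) := by
        rw [hsz, PySem.Set.len]
        omega
      by_cases hone : f2.size = 1
      · rw [if_pos (hcond.mpr hone), if_pos hone]
      · rw [if_neg (fun h' => hone (hcond.mp h')), if_neg hone]
        have := ih (a.set i nx) f2 (i + 1) (by rw [List.length_set]; omega) hInv'
        push_cast at this ⊢
        exact this
    · rw [if_neg hgt, if_neg hgt]
      have hsz : f.size = (PySem.Set.ofList a).length := size_eq_distinct _ _ hInv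
      have hcond : (PySem.Set.len (PySem.Set.ofList a) = 1) ↔ (f.size = 1) := by
        rw [hsz, PySem.Set.len]
        omega
      by_cases hone : f.size = 1
      · rw [if_pos (hcond.mpr hone), if_pos hone]
      · rw [if_neg (fun h' => hone (hcond.mp h')), if_neg hone]
        have := ih a f (i + 1) (by omega) hInv
        push_cast at this ⊢
        exact this

-- ===== VERDICT (by name: the statement is the Claim_ definition above) =====
theorem dsa_spec : Claim_equal_dsa := by
  intro a b _ _
  unfold Spec_dsa dsa dsa_alt
  rw [PySem.Dict.foldl_insert_getD_add_one_eq_counter]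
  exact go_eq b a.length a (PySem.Dict.counter a) 0 (by omega) (invD_counter a)
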